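-- pv_equiv track=rewrite | github.com/philippdrebes/MSCIDS_PDS01 | Pycharm/SW05/04_Functions_intro/70_multiple_return_values.py | sum_and_mult_return
-- ===== SOURCE A (Python) =====
-- def sum_and_mult_return(i):
--     sum = 0
--     for j in range(1,i+1):
--         sum = sum + j
--     mult = 1
--     for y in range(1,i+1):
--         mult = mult * y
--     return (sum, mult)
-- ===== SOURCE B (Python) =====
-- def sum_and_mult_return(i):
--     n = i if i > 0 else 0
--     s = n * (n + 1) // 2
--     mult = 1
--     y = i
--     while y > 1:
--         mult = mult * y
--         y = y - 1
--     return (s, mult)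
-- ===== Notes on version B (the rewrite author's own statement) =====
-- stated objective: alternative
-- what changed: The summation loop is replaced by the closed-form clamped triangular-number formula, and the factorial is accumulated by a count-down while loop instead of an ascending for loop.
import Mathlib
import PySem

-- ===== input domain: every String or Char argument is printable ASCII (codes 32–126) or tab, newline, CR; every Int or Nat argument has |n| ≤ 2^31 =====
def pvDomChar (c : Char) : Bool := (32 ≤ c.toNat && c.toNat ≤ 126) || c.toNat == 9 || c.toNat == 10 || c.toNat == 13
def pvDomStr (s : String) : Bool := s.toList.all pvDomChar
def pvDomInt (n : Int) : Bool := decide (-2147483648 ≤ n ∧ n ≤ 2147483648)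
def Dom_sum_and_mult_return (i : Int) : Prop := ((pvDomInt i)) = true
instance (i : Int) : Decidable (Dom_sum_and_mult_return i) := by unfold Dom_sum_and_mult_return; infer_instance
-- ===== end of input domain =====

-- B computes the sum 1..i in closed form (max(i,0)*(max(i,0)+1)//2) and the factorial by a count-down loop, replacing A's two ascending loops.


-- ===== PORT A =====
def sum_and_mult_return (i : Int) : Int × Int :=
  let s := (PySem.List.pyRange 1 (i+1) 1).foldl (fun acc j => acc + j) 0
  let m := (PySem.List.pyRange 1 (i+1) 1).foldl (fun acc y => acc * y) 1
  (s, m)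

-- ===== PORT B =====
-- the 'while y > 1' count-down loop of Source B
def factLoop (mult y : Int) : Int :=
  if 1 < y then factLoop (mult * y) (y - 1) else mult
termination_by y.toNat
decreasing_by omega

def sum_and_mult_return_alt (i : Int) : Int × Int :=
  let n := if 0 < i then i else 0
  (PySem.Int.floordiv (n * (n + 1)) 2, factLoop 1 i)

-- ===== PRECONDITION & SPEC =====
def Spec_sum_and_mult_return (i : Int) (out : Int × Int) : Prop := out = sum_and_mult_return_alt i
instance (i : Int) (out : Int × Int) : Decidable (Spec_sum_and_mult_return i out) := by unfold Spec_sum_and_mult_return; infer_instance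

-- ===== CLAIM (what is proved, stated in full; the proofs are below) =====
def Claim_equal_sum_and_mult_return : Prop := ∀ (i : Int), Dom_sum_and_mult_return i → Spec_sum_and_mult_return i (sum_and_mult_return i)

-- ===== LEMMAS AND PROOFS =====

lemma factLoop_mul (m y : Int) : factLoop m y = m * factLoop 1 y := by
  by_cases h : 1 < y
  · conv_lhs => rw [factLoop]
    conv_rhs => rw [factLoop]
    rw [if_pos h, if_pos h, factLoop_mul (m * y), factLoop_mul (1 * y)]
    ring
  · conv_lhs => rw [factLoop]
    conv_rhs => rw [factLoop]
    rw [if_neg h, if_neg h]; ring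
termination_by y.toNat
decreasing_by all_goals omega

lemma factLoop_pos (y : Int) (h : 1 < y) : factLoop 1 y = y * factLoop 1 (y - 1) := by
  conv_lhs => rw [factLoop]
  rw [if_pos h, factLoop_mul (1 * y)]
  ring

lemma sum_loop_eq (n : Nat) :
    2 * (PySem.List.pyRange 1 ((n : Int) + 1) 1).foldl (fun acc j => acc + j) 0
      = (n : Int) * ((n : Int) + 1) := by
  induction n with
  | zero => simp [PySem.List.pyRange_one_eq_nil]
  | succ k ih =>
    rw [show ((k + 1 : Nat) : Int) + 1 = ((k : Int) + 1) + 1 by push_cast; ring,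
        PySem.List.pyRange_one_succ_right (by omega), List.foldl_append]
    simp only [List.foldl_cons, List.foldl_nil]
    push_cast
    push_cast at ih
    linear_combination ih

lemma mult_loop_eq (n : Nat) :
    (PySem.List.pyRange 1 ((n : Int) + 1) 1).foldl (fun acc y => acc * y) 1
      = factLoop 1 (n : Int) := by
  induction n with
  | zero => simp [PySem.List.pyRange_one_eq_nil, factLoop]
  | succ k ih =>
    rw [show ((k + 1 : Nat) : Int) + 1 = ((k : Int) + 1) + 1 by push_cast; ring,
        PySem.List.pyRange_one_succ_right (by omega), List.foldl_append, ih]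
    simp only [List.foldl_cons, List.foldl_nil]
    rcases Nat.eq_zero_or_pos k with hk | hk
    · subst hk; simp [factLoop]
    · rw [show ((k + 1 : Nat) : Int) = (k : Int) + 1 by push_cast; ring,
          show factLoop 1 ((k : Int) + 1) = ((k : Int) + 1) * factLoop 1 (k : Int) by
            rw [factLoop_pos ((k : Int) + 1) (by omega)]; ring_nf]
      ring

lemma sum_and_mult_eq (i : Int) : sum_and_mult_return i = sum_and_mult_return_alt i := by
  simp only [sum_and_mult_return, sum_and_mult_return_alt]
  by_cases h : 0 < i
  · obtain ⟨n, hn⟩ : ∃ n : Nat, i = (n : Int) := ⟨i.toNat, by omega⟩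
    subst hn
    rw [mult_loop_eq, if_pos h]
    have hs := sum_loop_eq n
    congr 1
    rw [PySem.Int.floordiv_eq_ediv_of_pos (by omega)]
    omega
  · have hnil : PySem.List.pyRange 1 (i + 1) 1 = [] :=
      PySem.List.pyRange_one_eq_nil (by omega)
    rw [hnil]
    have hf : factLoop 1 i = 1 := by rw [factLoop, if_neg (by omega)]
    simp only [List.foldl_nil, if_neg h, hf]
    simp [PySem.Int.floordiv]

-- ===== VERDICT (by name: the statement is the Claim_ definition above) =====
theorem sum_and_mult_return_spec : Claim_equal_sum_and_mult_return := by
  intro i _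
  exact sum_and_mult_eq i
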